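-- pv_equiv track=rewrite | github.com/Demesaikiran/Competetive-Programming | 2. Programs/WEEK-1/ErasingMaximum.py | EraseMaximum
-- ===== SOURCE A (Python) =====
-- def EraseMaximum(a):
--
--     maxy = max(a)
--     maxCount = a.count(maxy)
--     count = 0
--
--     if maxCount < 3:
--         a.remove(maxy)
--         return a
--     else:
--
--         for i in range(len(a)):
--             if a[i] == maxy:
--                 count += 1
--
--             if count == 3:
--                 del(a[i])
--                 return a
--
--             else:
--                 continue
-- ===== SOURCE B (Python) =====
-- def EraseMaximum(a):
--     maxy = max(a)
--     idxs = [i for i, x in enumerate(a) if x == maxy]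
--     del a[idxs[0] if len(idxs) < 3 else idxs[2]]
--     return a
-- ===== Notes on version B (the rewrite author's own statement) =====
-- stated objective: simpler
-- what changed: Replaces A's two branches (list.remove vs an index loop counting occurrences to 3) by one structure: collect the indices of the maximum once, then delete a single position (the first index if fewer than three occurrences, else the third).
-- outside the precondition, e.g. on EraseMaximum([]): A raises ValueError, B raises ValueError
import Mathlib
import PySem

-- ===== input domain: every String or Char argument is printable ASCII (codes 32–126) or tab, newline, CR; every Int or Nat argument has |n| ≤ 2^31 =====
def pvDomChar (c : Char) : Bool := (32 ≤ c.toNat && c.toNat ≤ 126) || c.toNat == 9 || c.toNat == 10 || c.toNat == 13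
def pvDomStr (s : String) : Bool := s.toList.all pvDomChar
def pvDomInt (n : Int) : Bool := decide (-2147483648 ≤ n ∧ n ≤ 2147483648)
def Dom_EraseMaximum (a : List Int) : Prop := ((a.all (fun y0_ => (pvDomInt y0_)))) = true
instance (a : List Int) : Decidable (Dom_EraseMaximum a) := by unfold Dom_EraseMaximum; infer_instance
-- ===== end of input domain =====

-- B replaces A's two branches (list.remove vs an index loop counting to 3) by one
-- index-table-then-single-deletion structure (objective: simpler). Both A and B mutate
-- the caller's list in Python in the same way (one element deleted); the equivalence
-- proved here is about the returned list.

-- ===== PORT A =====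
-- the 'for i in range(len(a)): …' loop of A's else-branch (count ticks up; del a[i] and
-- return when it reaches 3; falling off the loop Python returns None — unreachable under Pre_,
-- transliterated as returning a)
def eraseLoopA (a : List Int) (maxy : Int) : List Int → Int → List Int
  | [], _ => a
  | i :: rest, count =>
    let count' := if PySem.List.pyGetD a i 0 == maxy then count + 1 else count
    if count' == 3 then ((PySem.List.pop? a i).map (fun r => r.2)).getD a
    else eraseLoopA a maxy rest count'

def EraseMaximum (a : List Int) : List Int :=
  match PySem.List.max? a (fun x => x) with
  | none => []        -- max([]) raises ValueError; excluded by Pre_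
  | some maxy =>
    if PySem.List.count a maxy < 3 then (PySem.List.remove? a maxy).getD a
    else eraseLoopA a maxy (PySem.List.pyRange 0 (a.length : Int)) 0

-- ===== PORT B =====
def EraseMaximum_alt (a : List Int) : List Int :=
  match PySem.List.max? a (fun x => x) with
  | none => []        -- max([]) raises ValueError; excluded by Pre_
  | some maxy =>
    let idxs := ((PySem.List.enumerate a).filter (fun p => p.2 == maxy)).map (fun p => p.1)
    let j := if idxs.length < 3 then PySem.List.pyGetD idxs 0 0 else PySem.List.pyGetD idxs 2 0
    a.eraseIdx j.toNat

-- ===== PRECONDITION & SPEC =====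
-- Pre_ excludes only the empty list, on which A (and B) raise ValueError from max([]).
def Pre_EraseMaximum (a : List Int) : Prop := a ≠ []
instance (a : List Int) : Decidable (Pre_EraseMaximum a) := by unfold Pre_EraseMaximum; infer_instance
def pvWitness_EraseMaximum : List Int := [1, 3, 2, 3, 3]

def Spec_EraseMaximum (a : List Int) (out : List Int) : Prop := out = EraseMaximum_alt a
instance (a : List Int) (out : List Int) : Decidable (Spec_EraseMaximum a out) := by unfold Spec_EraseMaximum; infer_instance

-- ===== CLAIM (what is proved, stated in full; the proofs are below) =====
def Claim_equal_EraseMaximum : Prop := ∀ (a : List Int), Dom_EraseMaximum a → Pre_EraseMaximum a → Spec_EraseMaximum a (EraseMaximum a)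

-- ===== LEMMAS AND PROOFS =====

-- proof-side helper: the list of positions (from offset s) at which maxy occurs
def occFrom (maxy : Int) : List Int → Nat → List Nat
  | [], _ => []
  | x :: t, s => if x == maxy then s :: occFrom maxy t (s+1) else occFrom maxy t (s+1)

lemma eraseLoopA_cons (a : List Int) (maxy i : Int) (rest : List Int) (count : Int) :
    eraseLoopA a maxy (i :: rest) count =
      if ((if PySem.List.pyGetD a i 0 == maxy then count + 1 else count) == 3)
      then ((PySem.List.pop? a i).map (fun r => r.2)).getD a
      else eraseLoopA a maxy rest (if PySem.List.pyGetD a i 0 == maxy then count + 1 else count) := rfl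

lemma occFrom_length (maxy : Int) : ∀ (l : List Int) (s : Nat),
    (occFrom maxy l s).length = l.count maxy := by
  intro l
  induction l with
  | nil => intro s; simp [occFrom]
  | cons x t ih =>
    intro s
    by_cases h : x = maxy <;> simp [occFrom, h, ih]

lemma occFrom_shift (maxy : Int) : ∀ (l : List Int) (s : Nat),
    occFrom maxy l s = (occFrom maxy l 0).map (fun n => n + s) := by
  intro l
  induction l with
  | nil => intro s; simp [occFrom]
  | cons x t ih =>
    intro s
    by_cases h : x = maxy <;>
      simp [occFrom, h, ih (s+1), ih 1, List.map_map] <;> (intros; omega)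

-- B's index comprehension is occFrom (cast to Int)
lemma idxs_eq_occFrom (maxy : Int) : ∀ (l : List Int) (s : Nat),
    ((PySem.List.enumerate l (s : Int)).filter (fun p => p.2 == maxy)).map (fun p => p.1)
      = (occFrom maxy l s).map (fun n => Int.ofNat n) := by
  intro l
  induction l with
  | nil => intro s; simp [PySem.List.enumerate, occFrom]
  | cons x t ih =>
    intro s
    rw [PySem.List.enumerate_cons,
        show (s : Int) + 1 = ((s + 1 : Nat) : Int) from by push_cast; ring]
    by_cases h : x = maxy
    · rw [List.filter_cons_of_pos (by simp [h]), List.map_cons, ih (s+1)]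
      simp [occFrom, h]
    · rw [List.filter_cons_of_neg (by simp [h]), ih (s+1)]
      simp [occFrom, h]

-- remove of the maximum = delete at the first occurrence position
lemma erase_eq_eraseIdx_occFrom (maxy : Int) : ∀ (l : List Int), maxy ∈ l →
    l.erase maxy = l.eraseIdx ((occFrom maxy l 0).getD 0 0) := by
  intro l
  induction l with
  | nil => intro h; simp at h
  | cons x t ih =>
    intro hmem
    by_cases h : x = maxy
    · simp [occFrom, h, List.erase_cons_head]
    · have hmt : maxy ∈ t := by
        rcases List.mem_cons.mp hmem with h' | h'
        · exact absurd h'.symm h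
        · exact h'
      have hne : occFrom maxy t 0 ≠ [] := by
        intro hnil
        have hl := occFrom_length maxy t 0
        rw [hnil] at hl
        have hp := List.count_pos_iff.mpr hmt
        simp at hl
        omega
      have hbe : ¬ (x == maxy) = true := by simp [h]
      rw [List.erase_cons_tail (by simpa using hbe), ih hmt]
      have hrw : occFrom maxy (x :: t) 0 = (occFrom maxy t 0).map (fun n => n + 1) := by
        simp [occFrom, h, occFrom_shift maxy t 1]
      rw [hrw]
      rcases List.exists_cons_of_ne_nil hne with ⟨j, js, hjs⟩
      simp [hjs]

-- the loop of A's else-branch deletes at the (3-m)-th remaining occurrence position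
lemma loopA_eq (maxy : Int) : ∀ (fuel : Nat) (a : List Int) (k m : Nat),
    a.length ≤ k + fuel → m < 3 → 3 ≤ m + (a.drop k).count maxy →
    eraseLoopA a maxy (PySem.List.pyRange (k : Int) (a.length : Int)) (m : Int)
      = a.eraseIdx ((occFrom maxy (a.drop k) k).getD (2 - m) 0) := by
  intro fuel
  induction fuel with
  | zero =>
    intro a k m hlen hm hcnt
    have : a.drop k = [] := List.drop_eq_nil_of_le (by omega)
    rw [this] at hcnt; simp at hcnt; omega
  | succ fuel ih =>
    intro a k m hlen hm hcnt
    by_cases hk : k < a.length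
    · have hdrop : a.drop k = a[k] :: a.drop (k + 1) := List.drop_eq_getElem_cons hk
      have hrange : PySem.List.pyRange (k : Int) (a.length : Int)
          = (k : Int) :: PySem.List.pyRange ((k : Int) + 1) (a.length : Int) :=
        PySem.List.pyRange_one_cons (by exact_mod_cast hk)
      have hget : PySem.List.pyGetD a (k : Int) 0 = a[k] := by
        rw [PySem.List.pyGetD_natCast]
        exact List.getD_eq_getElem a 0 hk
      have hcast : ((k : Int) + 1) = ((k + 1 : Nat) : Int) := by push_cast; ring
      rw [hrange, eraseLoopA_cons, hget]
      by_cases hx : a[k] = maxy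
      · have hxb : (a[k] == maxy) = true := by simp [hx]
        rw [hxb, if_pos rfl]
        have hcc : (a.drop k).count maxy = (a.drop (k+1)).count maxy + 1 := by
          rw [hdrop, List.count_cons]; simp [hx]
        by_cases hm2 : m = 2
        · subst hm2
          rw [if_pos (by simp), PySem.List.pop?_natCast a k hk, hdrop]
          simp [occFrom, hx]
        · rw [if_neg (by simp; omega)]
          have hmc : (m : Int) + 1 = ((m + 1 : Nat) : Int) := by push_cast; ring
          rw [hmc, hcast, ih a (k+1) (m+1) (by omega) (by omega) (by omega)]
          rw [hdrop]
          have hocc : occFrom maxy (a[k] :: a.drop (k+1)) k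
              = k :: occFrom maxy (a.drop (k+1)) (k+1) := by simp [occFrom, hx]
          rw [hocc]
          have h2m : 2 - m = (2 - (m+1)) + 1 := by omega
          rw [h2m]
          simp
      · have hxb : (a[k] == maxy) = false := by simp [hx]
        rw [hxb, if_neg (show ¬(false = true) by simp)]
        have hcc : (a.drop k).count maxy = (a.drop (k+1)).count maxy := by
          rw [hdrop, List.count_cons]; simp [hx]
        rw [if_neg (show ¬(((m : Int) == 3) = true) by simp; omega), hcast,
            ih a (k+1) m (by omega) hm (by omega)]
        rw [hdrop]
        have hocc : occFrom maxy (a[k] :: a.drop (k+1)) k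
            = occFrom maxy (a.drop (k+1)) (k+1) := by simp [occFrom, hx]
        rw [hocc]
    · have hnil : a.drop k = [] := List.drop_eq_nil_of_le (by omega)
      rw [hnil] at hcnt; simp at hcnt; omega

-- ===== VERDICT (by name: the statement is the Claim_ definition above) =====
theorem EraseMaximum_spec : Claim_equal_EraseMaximum := by
  intro a _hdom hpre
  unfold Spec_EraseMaximum EraseMaximum EraseMaximum_alt
  cases hmax : PySem.List.max? a (fun x => x) with
  | none => rfl
  | some maxy =>
    dsimp only
    have hmem : maxy ∈ a := PySem.List.max?_mem hmax
    have hidxs := idxs_eq_occFrom maxy a 0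
    rw [Nat.cast_zero] at hidxs
    have hlen : (occFrom maxy a 0).length = a.count maxy := occFrom_length maxy a 0
    have hcpos : 0 < a.count maxy := List.count_pos_iff.mpr hmem
    rw [PySem.List.count_eq]
    simp only [hidxs, List.length_map, hlen]
    by_cases hc : a.count maxy < 3
    · rw [if_pos hc, if_pos hc]
      rw [PySem.List.remove?_eq_some_erase a maxy hmem, Option.getD_some,
          erase_eq_eraseIdx_occFrom maxy a hmem]
      congr 1
      rcases List.exists_cons_of_ne_nil (show occFrom maxy a 0 ≠ [] from by
        intro h; rw [h] at hlen; simp at hlen; omega) with ⟨j, js, hjs⟩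
      simp [hjs, PySem.List.pyGetD, PySem.List.pyIdx?, PySem.List.pyGet?]
    · rw [if_neg hc, if_neg hc]
      have hge : 3 ≤ 0 + (List.drop 0 a).count maxy := by
        simp only [List.drop_zero, Nat.zero_add]
        omega
      have := loopA_eq maxy a.length a 0 0 (by omega) (by omega) hge
      simp only [Nat.cast_zero, List.drop_zero] at this
      rw [this]
      congr 1
      have h2 : 2 < (occFrom maxy a 0).length := by omega
      rcases List.exists_cons_of_ne_nil (show occFrom maxy a 0 ≠ [] from
        List.ne_nil_of_length_pos (by omega)) with ⟨j0, t0, h0⟩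
      rw [h0] at h2 ⊢
      rcases List.exists_cons_of_ne_nil (show t0 ≠ [] from
        List.ne_nil_of_length_pos (by simp at h2; omega)) with ⟨j1, t1, h1⟩
      rw [h1] at h2 ⊢
      rcases List.exists_cons_of_ne_nil (show t1 ≠ [] from
        List.ne_nil_of_length_pos (by simp at h2; omega)) with ⟨j2, t2, h2'⟩
      rw [h2', show ((2:Int)) = ((2:Nat):Int) by norm_num, PySem.List.pyGetD_natCast]
      simp
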